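-- pv_equiv track=rewrite | github.com/Saaketh-J/Kindle-Clippings-Extractor | kindleExtract.py | parse_clippings_file
-- ===== SOURCE A (Python) =====
-- def parse_clippings_file(lines):
--     clippings = []
--     current_clipping = ''
--
--     for line in lines:
--         line = line.strip()
--
--         if line:
--             if line.startswith('=========='):
--                 if current_clipping:
--                     clippings.append(current_clipping)
--                 current_clipping = ''
--             else:
--                 current_clipping += line + '\n'
--
--     if current_clipping:
--         clippings.append(current_clipping)
--
--     return clippings
-- ===== SOURCE B (Python) =====
-- def parse_clippings_file(lines):
--     # Filter-then-group: strip all lines, drop empties, then cut the content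
--     # lines into runs delimited by '==========' separator lines.
--     content = [s for s in map(str.strip, lines) if s]
--     clippings = []
--     while content:
--         if content[0].startswith('=========='):
--             content = content[1:]
--         else:
--             k = next((i for i, l in enumerate(content)
--                       if l.startswith('==========')), len(content))
--             clippings.append(''.join(l + '\n' for l in content[:k]))
--             content = content[k:]
--     return clippings
-- ===== Notes on version B (the rewrite author's own statement) =====
-- stated objective: idiomatic
-- what changed: Replaces A's accumulator-and-flush state machine (building current_clipping string by string and flushing on separators) by filter-then-group: strip and drop empty lines first, then cut the content lines into maximal separator-free runs and join each run.
import Mathlib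
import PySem

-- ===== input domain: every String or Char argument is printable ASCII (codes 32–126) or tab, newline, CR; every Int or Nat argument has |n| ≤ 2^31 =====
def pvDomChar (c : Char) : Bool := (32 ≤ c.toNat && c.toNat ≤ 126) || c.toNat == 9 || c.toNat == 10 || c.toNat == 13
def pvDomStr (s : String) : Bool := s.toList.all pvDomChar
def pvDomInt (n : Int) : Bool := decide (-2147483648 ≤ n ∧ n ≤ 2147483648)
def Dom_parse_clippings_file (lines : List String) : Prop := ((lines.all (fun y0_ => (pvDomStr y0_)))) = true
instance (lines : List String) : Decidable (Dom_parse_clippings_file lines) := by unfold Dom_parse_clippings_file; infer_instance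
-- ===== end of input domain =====

-- B replaces A's accumulator-and-flush state machine by filter-then-group: strip and drop
-- empty lines first, then cut the content into separator-delimited runs (idiomatic; same cost).


-- ===== PORT A =====
-- one iteration of A's loop over (clippings, current_clipping)
def pcStepA (st : List String × String) (line : String) : List String × String :=
  let l := PySem.Str.strip line
  if l ≠ "" then
    if PySem.Str.startswith l "==========" then
      ((if st.2 ≠ "" then st.1 ++ [st.2] else st.1), "")
    else (st.1, st.2 ++ l ++ "\n")
  else st

def parse_clippings_file (lines : List String) : List String :=
  let st := lines.foldl pcStepA ([], "")
  if st.2 ≠ "" then st.1 ++ [st.2] else st.1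

-- ===== PORT B =====
-- ''.join(l + '\n' for l in g)  (right-associated; the same string by associativity)
def pcJoin (g : List String) : String := g.foldr (fun l a => l ++ "\n" ++ a) ""

-- B's while loop: drop a leading separator, else cut off the maximal separator-free run
def pcGroups : List String → List String
  | [] => []
  | l :: rest =>
    if PySem.Str.startswith l "==========" then pcGroups rest
    else
      pcJoin ((l :: rest).takeWhile (fun x => !PySem.Str.startswith x "=========="))
        :: pcGroups ((l :: rest).dropWhile (fun x => !PySem.Str.startswith x "=========="))
termination_by cs => cs.length
decreasing_by
  · simp
  · simp_all [List.dropWhile]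
    exact List.length_dropWhile_le _ _

def parse_clippings_file_alt (lines : List String) : List String :=
  pcGroups ((lines.map PySem.Str.strip).filter (fun s => s != ""))

-- ===== PRECONDITION & SPEC =====
def Spec_parse_clippings_file (lines : List String) (out : List String) : Prop := out = parse_clippings_file_alt lines
instance (lines : List String) (out : List String) : Decidable (Spec_parse_clippings_file lines out) := by unfold Spec_parse_clippings_file; infer_instance

-- ===== CLAIM (what is proved, stated in full; the proofs are below) =====
def Claim_equal_parse_clippings_file : Prop := ∀ (lines : List String), Dom_parse_clippings_file lines → Spec_parse_clippings_file lines (parse_clippings_file lines)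

-- ===== LEMMAS AND PROOFS =====
-- [s] if s nonempty, else [] (A's conditional append)
def pcEmit (s : String) : List String := if s ≠ "" then [s] else []

-- reference machine: A's remaining work on the already-filtered content lines
def pcMerge (cur : String) : List String → List String
  | [] => pcEmit cur
  | l :: rest =>
    if PySem.Str.startswith l "==========" then pcEmit cur ++ pcMerge "" rest
    else pcMerge (cur ++ l ++ "\n") rest

-- A's finish step
def pcFin (st : List String × String) : List String :=
  if st.2 ≠ "" then st.1 ++ [st.2] else st.1

-- A's fold over the raw lines equals pcMerge on the filtered content lines
lemma pcFold_merge : ∀ (lines : List String) (acc : List String) (cur : String),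
    pcFin (List.foldl pcStepA (acc, cur) lines)
      = acc ++ pcMerge cur ((lines.map PySem.Str.strip).filter (fun s => s != "")) := by
  intro lines
  induction lines with
  | nil =>
    intro acc cur
    simp only [List.foldl_nil, List.map_nil, List.filter_nil, pcMerge, pcFin, pcEmit]
    split <;> simp
  | cons line rest ih =>
    intro acc cur
    rw [List.foldl_cons]
    by_cases he : PySem.Str.strip line = ""
    · have hstep : pcStepA (acc, cur) line = (acc, cur) := by simp [pcStepA, he]
      rw [hstep]
      simp only [List.map_cons, List.filter_cons]
      simp only [he, bne_self_eq_false]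
      exact ih acc cur
    · by_cases hs : PySem.Str.startswith (PySem.Str.strip line) "=========="
      · have hsC : PySem.Chars.startswith (PySem.Chars.strip line.toList)
            (['=', '=', '=', '=', '=', '=', '=', '=', '=', '=']) = true := by simpa using hs
        have hstep : pcStepA (acc, cur) line = (acc ++ pcEmit cur, "") := by
          simp [pcStepA, he, hsC, pcEmit]
          split <;> simp
        rw [hstep, ih]
        simp only [List.map_cons, List.filter_cons]
        have hne : (PySem.Str.strip line != "") = true := by simp [he]
        rw [hne, if_pos rfl]
        simp [pcMerge, hsC, List.append_assoc]
      · have hsC : PySem.Chars.startswith (PySem.Chars.strip line.toList)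
            (['=', '=', '=', '=', '=', '=', '=', '=', '=', '=']) = false := by simpa using hs
        have hstep : pcStepA (acc, cur) line = (acc, cur ++ PySem.Str.strip line ++ "\n") := by
          simp [pcStepA, he, hsC]
        rw [hstep, ih]
        simp only [List.map_cons, List.filter_cons]
        have hne : (PySem.Str.strip line != "") = true := by simp [he]
        rw [hne, if_pos rfl]
        simp [pcMerge, hsC]

-- pcGroups satisfies the takeWhile/dropWhile unfolding on every list
lemma pcGroups_split (cs : List String) :
    pcGroups cs
      = pcEmit (pcJoin (cs.takeWhile (fun x => !PySem.Str.startswith x "==========")))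
          ++ pcGroups (cs.dropWhile (fun x => !PySem.Str.startswith x "==========")) := by
  cases cs with
  | nil => simp [pcGroups, pcJoin, pcEmit]
  | cons l rest =>
    by_cases hs : PySem.Str.startswith l "=========="
    · have hsC : PySem.Chars.startswith l.toList ['=', '=', '=', '=', '=', '=', '=', '=', '=', '='] = true := by simpa using hs
      have ht : (l :: rest).takeWhile (fun x => !PySem.Str.startswith x "==========") = [] := by
        simp [hsC]
      have hd : (l :: rest).dropWhile (fun x => !PySem.Str.startswith x "==========") = l :: rest := by
        simp [hsC]
      rw [ht, hd]
      simp [pcJoin, pcEmit]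
    · have hsC : PySem.Chars.startswith l.toList ['=', '=', '=', '=', '=', '=', '=', '=', '=', '='] = false := by simpa using hs
      have ht : (l :: rest).takeWhile (fun x => !PySem.Str.startswith x "==========")
          = l :: rest.takeWhile (fun x => !PySem.Str.startswith x "==========") := by
        simp [hsC]
      have hd : (l :: rest).dropWhile (fun x => !PySem.Str.startswith x "==========")
          = rest.dropWhile (fun x => !PySem.Str.startswith x "==========") := by
        simp [hsC]
      rw [pcGroups, if_neg hs, ht, hd]
      simp [pcEmit, pcJoin]

-- pcMerge equals B's grouping
lemma pcMerge_eq_groups : ∀ (cs : List String) (cur : String),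
    pcMerge cur cs
      = pcEmit (cur ++ pcJoin (cs.takeWhile (fun x => !PySem.Str.startswith x "==========")))
          ++ pcGroups (cs.dropWhile (fun x => !PySem.Str.startswith x "==========")) := by
  intro cs
  induction cs with
  | nil => intro cur; simp [pcMerge, pcGroups, pcJoin]
  | cons l rest ih =>
    intro cur
    by_cases hs : PySem.Str.startswith l "=========="
    · have hsC : PySem.Chars.startswith l.toList ['=', '=', '=', '=', '=', '=', '=', '=', '=', '='] = true := by simpa using hs
      have ht : (l :: rest).takeWhile (fun x => !PySem.Str.startswith x "==========") = [] := by
        simp [hsC]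
      have hd : (l :: rest).dropWhile (fun x => !PySem.Str.startswith x "==========") = l :: rest := by
        simp [hsC]
      rw [pcMerge, if_pos hs, ih "", ht, hd]
      simp only [String.empty_append]
      rw [← pcGroups_split rest]
      conv_rhs => rw [pcGroups]
      simp [hsC, pcJoin, pcEmit]
    · have hsC : PySem.Chars.startswith l.toList ['=', '=', '=', '=', '=', '=', '=', '=', '=', '='] = false := by simpa using hs
      have ht : (l :: rest).takeWhile (fun x => !PySem.Str.startswith x "==========")
          = l :: rest.takeWhile (fun x => !PySem.Str.startswith x "==========") := by
        simp [hsC]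
      have hd : (l :: rest).dropWhile (fun x => !PySem.Str.startswith x "==========")
          = rest.dropWhile (fun x => !PySem.Str.startswith x "==========") := by
        simp [hsC]
      rw [pcMerge, if_neg hs, ih (cur ++ l ++ "\n"), ht, hd]
      simp [pcJoin, String.append_assoc, pcEmit]

-- ===== VERDICT (by name: the statement is the Claim_ definition above) =====
theorem parse_clippings_file_spec : Claim_equal_parse_clippings_file := by
  intro lines _
  unfold Spec_parse_clippings_file parse_clippings_file parse_clippings_file_alt
  show pcFin (List.foldl pcStepA ([], "") lines) = _
  rw [pcFold_merge lines [] "", pcMerge_eq_groups]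
  simp only [List.nil_append, String.empty_append]
  rw [← pcGroups_split]
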